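-- pv_equiv track=rewrite | github.com/MotleyAI/slayer | slayer/mcp/server.py | _md_code_span
-- ===== SOURCE A (Python) =====
-- from typing import Any, Dict, List, NamedTuple, Optional, Tuple, Union
--
-- def _md_code_span(value: Any) -> str:
--     """Wrap *value* in a CommonMark inline code span, safe for any content.
--
--     The fence is chosen to be one backtick longer than the longest contiguous
--     run of backticks inside the value, so embedded backticks never break the
--     span.  Per the CommonMark spec, a space is added inside the fence when the
--     content starts or ends with a backtick.
--     """
--     text = str(value).replace("|", "\\|").replace("\r\n", " ").replace("\r", " ").replace("\n", " ").strip()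
--     if not text:
--         return "` `"
--     # Find the longest run of consecutive backticks
--     max_run = 0
--     run = 0
--     for ch in text:
--         if ch == "`":
--             run += 1
--             if run > max_run:
--                 max_run = run
--         else:
--             run = 0
--     fence = "`" * (max_run + 1)
--     # CommonMark: space padding needed when content starts or ends with backtick
--     if text.startswith("`") or text.endswith("`"):
--         return f"{fence} {text} {fence}"
--     return f"{fence}{text}{fence}"
-- ===== SOURCE B (Python) =====
-- def _md_code_span(value) -> str:
--     text = str(value).replace("|", "\\|").replace("\r\n", " ").replace("\r", " ").replace("\n", " ").strip()
--     if not text: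
--         return "` `"
--     # Grow the fence by substring search: the fence is the shortest backtick
--     # string that does not occur in the text (no run scan / counter needed).
--     n = 1
--     while "`" * n in text:
--         n += 1
--     fence = "`" * n
--     if text.startswith("`") or text.endswith("`"):
--         return f"{fence} {text} {fence}"
--     return f"{fence}{text}{fence}"
-- ===== Notes on version B (the rewrite author's own statement) =====
-- stated objective: alternative
-- what changed: Instead of scanning characters with a running counter and max to find the longest backtick run, B grows the fence directly by repeated substring search, trying fence lengths 1, 2, ... until the candidate fence no longer occurs in the text; the text normalisation and padding rule are unchanged.
import Mathlib
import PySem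

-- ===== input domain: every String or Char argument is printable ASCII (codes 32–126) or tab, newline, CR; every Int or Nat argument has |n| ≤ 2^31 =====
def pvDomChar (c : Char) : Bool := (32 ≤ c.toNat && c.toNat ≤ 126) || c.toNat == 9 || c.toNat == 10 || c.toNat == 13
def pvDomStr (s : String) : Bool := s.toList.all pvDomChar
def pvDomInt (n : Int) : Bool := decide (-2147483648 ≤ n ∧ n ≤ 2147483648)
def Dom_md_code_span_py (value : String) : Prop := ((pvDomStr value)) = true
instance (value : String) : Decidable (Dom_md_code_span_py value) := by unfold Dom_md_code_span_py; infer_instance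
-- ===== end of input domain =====

-- B replaces A's running-counter/max scan for the longest backtick run by growing the
-- fence via repeated substring search (shortest '`'*n not occurring in the text);
-- normalisation and padding are unchanged. Objective: alternative (same result, different algorithm).

-- ===== PORT A =====
def md_code_span_py (value : String) : String :=
  -- str(value) is the identity on a str argument
  let text := PySem.Str.strip (PySem.Str.replace (PySem.Str.replace (PySem.Str.replace
                (PySem.Str.replace value "|" "\\|") "\r\n" " ") "\r" " ") "\n" " ")
  if text = "" then "` `"
  else
    -- run/max_run loop over the characters of text
    let p := text.toList.foldl
      (fun (s : Nat × Nat) ch =>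
        if ch = '`' then (s.1 + 1, if s.1 + 1 > s.2 then s.1 + 1 else s.2)
        else (0, s.2)) (0, 0)
    let fence := String.ofList (List.replicate (p.2 + 1) '`')
    if PySem.Str.startswith text "`" || PySem.Str.endswith text "`" then
      fence ++ " " ++ text ++ " " ++ fence
    else fence ++ text ++ fence

-- ===== PORT B =====
-- while '`' * n in text: n += 1   — substring search per candidate fence length
def pvFenceLen (text : List Char) (n : Nat) : Nat :=
  if h : List.replicate n '`' <:+: text then pvFenceLen text (n + 1) else n
termination_by text.length + 1 - n
decreasing_by
  have hle : n ≤ text.length := by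
    simpa using h.length_le
  omega

def md_code_span_py_alt (value : String) : String :=
  let text := PySem.Str.strip (PySem.Str.replace (PySem.Str.replace (PySem.Str.replace
                (PySem.Str.replace value "|" "\\|") "\r\n" " ") "\r" " ") "\n" " ")
  if text = "" then "` `"
  else
    let fence := String.ofList (List.replicate (pvFenceLen text.toList 1) '`')
    if PySem.Str.startswith text "`" || PySem.Str.endswith text "`" then
      fence ++ " " ++ text ++ " " ++ fence
    else fence ++ text ++ fence

-- ===== PRECONDITION & SPEC =====
def Spec_md_code_span_py (value : String) (out : String) : Prop := out = md_code_span_py_alt value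
instance (value : String) (out : String) : Decidable (Spec_md_code_span_py value out) := by unfold Spec_md_code_span_py; infer_instance

-- ===== CLAIM =====
def Claim_equal_md_code_span_py : Prop := ∀ (value : String), Dom_md_code_span_py value → Spec_md_code_span_py value (md_code_span_py value)

-- ===== LEMMAS AND PROOFS =====

-- A's loop step, named for the lemmas below (the port inlines the same lambda)
def pvAStep : Nat × Nat → Char → Nat × Nat := fun s ch =>
  if ch = '`' then (s.1 + 1, if s.1 + 1 > s.2 then s.1 + 1 else s.2) else (0, s.2)

lemma pvAStep_bt (r m : Nat) : pvAStep (r, m) '`' = (r + 1, max m (r + 1)) := by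
  simp [pvAStep]; split <;> omega

lemma pvAStep_nonbt {c : Char} (h : ¬ c = '`') (r m : Nat) : pvAStep (r, m) c = (0, m) := by
  simp [pvAStep, h]

lemma pvRep_suffix_rep {n m : Nat} (h : n ≤ m) : List.replicate n '`' <:+ List.replicate m '`' :=
  ⟨List.replicate (m - n) '`', by rw [← List.replicate_add]; congr 1; omega⟩

lemma pvInfix_concat_self (l : List Char) (c : Char) : l <:+: l ++ [c] :=
  ⟨[], [c], by simp⟩

-- a nonempty all-backtick suffix of l ++ [c] with c ≠ '`' is impossible
lemma pvSuffix_concat {l : List Char} {c : Char} {n : Nat} (hc : ¬ c = '`')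
    (h : List.replicate (n + 1) '`' <:+ l ++ [c]) : False := by
  obtain ⟨s, hs⟩ := h
  rw [List.replicate_succ', ← List.append_assoc] at hs
  have h2 := (List.append_inj' hs rfl).2
  exact hc (by simpa using h2.symm)

-- peel the last backtick off a suffix equation
lemma pvSuffix_concat_bt {l : List Char} {n : Nat}
    (h : List.replicate (n + 1) '`' <:+ l ++ ['`']) : List.replicate n '`' <:+ l := by
  obtain ⟨s, hs⟩ := h
  rw [List.replicate_succ', ← List.append_assoc] at hs
  exact ⟨s, (List.append_inj' hs rfl).1⟩

-- a nonempty all-backtick infix of l ++ [c] with c ≠ '`' is an infix of l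
lemma pvInfix_concat {l : List Char} {c : Char} {n : Nat} (hc : ¬ c = '`')
    (h : List.replicate (n + 1) '`' <:+: l ++ [c]) : List.replicate (n + 1) '`' <:+: l := by
  obtain ⟨s, t, hst⟩ := h
  rcases List.eq_nil_or_concat t with rfl | ⟨t', c', rfl⟩
  · rw [List.append_nil] at hst
    exact (pvSuffix_concat hc ⟨s, hst⟩).elim
  · rw [List.concat_eq_append, ← List.append_assoc] at hst
    exact ⟨s, t', (List.append_inj' hst rfl).1⟩

-- Main invariant of A's fold: the first component is exactly the longest backtick
-- suffix, the second exactly the longest backtick infix.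
lemma pvInv (l : List Char) :
    (∀ n, List.replicate n '`' <:+ l ↔ n ≤ (l.foldl pvAStep (0, 0)).1) ∧
    (∀ n, List.replicate n '`' <:+: l ↔ n ≤ (l.foldl pvAStep (0, 0)).2) := by
  induction l using List.reverseRecOn with
  | nil =>
      refine ⟨fun n => ?_, fun n => ?_⟩ <;> simp only [List.foldl_nil] <;> constructor
      · intro h; have := h.length_le; simp at this; omega
      · intro h; simp at h; simp [h]
      · intro h; have := h.length_le; simp at this; omega
      · intro h; simp at h; simp [h]
  | append_singleton l c ih =>
      obtain ⟨ih1, ih2⟩ := ih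
      rw [List.foldl_append]
      by_cases hc : c = '`'
      · subst hc
        rw [List.foldl_cons, List.foldl_nil, show (l.foldl pvAStep (0,0)) =
          ((l.foldl pvAStep (0,0)).1, (l.foldl pvAStep (0,0)).2) from rfl, pvAStep_bt]
        have hsufr : List.replicate ((l.foldl pvAStep (0,0)).1 + 1) '`' <:+ l ++ ['`'] := by
          obtain ⟨s, hs⟩ := (ih1 _).mpr le_rfl
          exact ⟨s, by rw [List.replicate_succ', ← List.append_assoc, hs]⟩
        constructor
        · intro n
          constructor
          · intro h
            cases n with
            | zero => simp
            | succ k =>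
                have := (ih1 k).mp (pvSuffix_concat_bt h)
                exact Nat.succ_le_succ this
          · intro h
            exact (pvRep_suffix_rep h).trans hsufr
        · intro n
          constructor
          · intro h
            obtain ⟨s, t, hst⟩ := h
            rcases List.eq_nil_or_concat t with rfl | ⟨t', c', rfl⟩
            · -- replicate n is a suffix of l ++ ['`']
              rw [List.append_nil] at hst
              cases n with
              | zero => simp
              | succ k =>
                  have hk : k ≤ (l.foldl pvAStep (0,0)).1 :=
                    (ih1 k).mp (pvSuffix_concat_bt ⟨s, hst⟩)
                  exact le_trans (Nat.succ_le_succ hk) (le_max_right _ _)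
            · rw [List.concat_eq_append, ← List.append_assoc] at hst
              have hn : n ≤ (l.foldl pvAStep (0,0)).2 :=
                (ih2 n).mp ⟨s, t', (List.append_inj' hst rfl).1⟩
              exact hn.trans (le_max_left _ _)
          · intro h
            rcases le_max_iff.mp h with h' | h'
            · exact ((ih2 n).mpr h').trans (pvInfix_concat_self l '`')
            · exact ((pvRep_suffix_rep h').trans hsufr).isInfix
      · rw [List.foldl_cons, List.foldl_nil, show (l.foldl pvAStep (0,0)) =
          ((l.foldl pvAStep (0,0)).1, (l.foldl pvAStep (0,0)).2) from rfl, pvAStep_nonbt hc]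
        constructor
        · intro n
          constructor
          · intro h
            cases n with
            | zero => simp
            | succ k => exact (pvSuffix_concat hc h).elim
          · intro h
            have hn : n = 0 := by simpa using h
            simp [hn]
        · intro n
          constructor
          · intro h
            cases n with
            | zero => simp
            | succ k => exact (ih2 _).mp (pvInfix_concat hc h)
          · intro h
            exact ((ih2 n).mpr h).trans (pvInfix_concat_self l c)

lemma pvFenceLen_eq (l : List Char) :
    ∀ d n, (l.foldl pvAStep (0, 0)).2 + 1 - n = d → n ≤ (l.foldl pvAStep (0, 0)).2 + 1 →
      pvFenceLen l n = (l.foldl pvAStep (0, 0)).2 + 1 := by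
  intro d
  induction d with
  | zero =>
      intro n hd hn
      have hn' : n = (l.foldl pvAStep (0, 0)).2 + 1 := by omega
      rw [pvFenceLen, dif_neg, hn']
      rw [(pvInv l).2 n, hn']
      omega
  | succ d ih =>
      intro n hd hn
      have hin : List.replicate n '`' <:+: l := ((pvInv l).2 n).mpr (by omega)
      rw [pvFenceLen, dif_pos hin]
      exact ih (n + 1) (by omega) (by omega)

-- ===== VERDICT =====
theorem md_code_span_py_spec : Claim_equal_md_code_span_py := by
  intro value _
  unfold Spec_md_code_span_py md_code_span_py md_code_span_py_alt
  simp only []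
  set text := PySem.Str.strip (PySem.Str.replace (PySem.Str.replace (PySem.Str.replace
                (PySem.Str.replace value "|" "\\|") "\r\n" " ") "\r" " ") "\n" " ") with htext
  by_cases h : text = ""
  · simp [h]
  · simp only [if_neg h]
    have hlam : (fun (s : Nat × Nat) ch =>
        if ch = '`' then (s.1 + 1, if s.1 + 1 > s.2 then s.1 + 1 else s.2)
        else (0, s.2)) = pvAStep := rfl
    rw [hlam, pvFenceLen_eq text.toList ((text.toList.foldl pvAStep (0,0)).2 + 1 - 1) 1 rfl (by omega)]
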